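-- pv_equiv track=rewrite | github.com/queite/trybe-exercicios | ciencias-da-computacao/6.1-hashmap-e-dict/formacao_de_palavras.py | find_match_characters
-- ===== SOURCE A (Python) =====
-- def create_hashing(string: str):
--     hash = {}
--     for char in string:
--         if char in hash:
--             hash[char] += 1
--         else:
--             hash[char] = 1
--
--     return hash
--
-- def find_match_characters(string: str, words: list):
--     string_hashmap = create_hashing(string)
--     result = []
--     length = 0
--
--     for word in words:
--         word_hashmap = create_hashing(word)
--         word_in_string_hashmap = True
--         for char in word_hashmap:
--             if char not in string_hashmap:
--                 word_in_string_hashmap = False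
--                 break
--             elif word_hashmap[char] > string_hashmap[char]:
--                 word_in_string_hashmap = False
--                 break
--         if word_in_string_hashmap:
--             result.append(word)
--             length += len(word)
--     return (
--         "Palavras que podem ser formadas com os caracteres da string "
--         f'"{string}": {result} com um tamanho total de {length}.'
--     )
-- ===== SOURCE B (Python) =====
-- def find_match_characters(string: str, words: list):
--     # Sort the string's characters once; a word is formable iff its sorted
--     # characters are a subsequence of the sorted pool (greedy merge match).
--     pool = sorted(string)
--     result = []
--     length = 0
--     for word in words:
--         need = sorted(word)
--         i = 0
--         for c in pool:
--             if i < len(need) and need[i] == c: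
--                 i += 1
--         if i == len(need):
--             result.append(word)
--             length += len(word)
--     return (
--         "Palavras que podem ser formadas com os caracteres da string "
--         f'"{string}": {result} com um tamanho total de {length}.'
--     )
-- ===== Notes on version B (the rewrite author's own statement) =====
-- stated objective: alternative
-- what changed: B replaces the per-word count-dict build and key-by-key map comparison with sorting: it sorts the string's characters once and, for each word, sorts the word's characters and greedily matches them against the sorted pool in one merge pass (sorted(word) is a subsequence of sorted(string) iff the multiset fits).
import Mathlib
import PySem

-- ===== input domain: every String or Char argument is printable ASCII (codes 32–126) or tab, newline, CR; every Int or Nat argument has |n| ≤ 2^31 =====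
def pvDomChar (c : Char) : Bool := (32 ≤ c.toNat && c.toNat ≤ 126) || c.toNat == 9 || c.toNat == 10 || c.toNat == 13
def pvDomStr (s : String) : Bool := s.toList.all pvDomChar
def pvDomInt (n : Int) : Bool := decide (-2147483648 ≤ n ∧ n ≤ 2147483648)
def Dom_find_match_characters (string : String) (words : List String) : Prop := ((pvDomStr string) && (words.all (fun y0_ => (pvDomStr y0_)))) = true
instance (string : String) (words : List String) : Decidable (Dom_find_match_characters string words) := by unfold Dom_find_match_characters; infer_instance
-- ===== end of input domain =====

-- B replaces A's per-word count-dict build and key-by-key map comparison with sorting: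
-- the string's characters are sorted once into a pool, and each word's sorted characters
-- are greedily matched against the pool in one merge pass (sorted(word) is a subsequence
-- of sorted(string) iff the word's character multiset fits); objective: alternative.

-- shared output formatting (identical f-string in both Pythons): Python repr of a list of
-- printable-ASCII/tab/newline/CR strings, exact on the stated domain
def pyReprChar (q : Char) (c : Char) : List Char :=
  if c = '\\' then ['\\', '\\']
  else if c = q then ['\\', q]
  else if c = '\t' then ['\\', 't']
  else if c = '\n' then ['\\', 'n']
  else if c = '\r' then ['\\', 'r']
  else [c]

def pyReprStr (s : String) : String :=
  let q : Char := if s.toList.contains '\'' && !(s.toList.contains '"') then '"' else '\''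
  String.ofList ([q] ++ s.toList.flatMap (pyReprChar q) ++ [q])

def pyReprList (ws : List String) : String :=
  "[" ++ PySem.Str.join ", " (ws.map pyReprStr) ++ "]"

def formatOut (string : String) (result : List String) (length : Int) : String :=
  "Palavras que podem ser formadas com os caracteres da string \"" ++ string ++ "\": "
    ++ pyReprList result ++ " com um tamanho total de " ++ PySem.Int.toStr length ++ "."

-- ===== PORT A =====
def create_hashing (string : String) : PySem.Dict Char Int :=
  string.toList.foldl
    (fun h c => if h.contains c then h.insert c (h.getD c 0 + 1) else h.insert c 1)
    PySem.Dict.empty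

-- the inner 'for char in word_hashmap: … break' loop of A
def checkWord (keys : List Char) (wh sh : PySem.Dict Char Int) : Bool :=
  match keys with
  | [] => true
  | c :: rest =>
    if !(sh.contains c) then false
    else if sh.getD c 0 < wh.getD c 0 then false
    else checkWord rest wh sh

def find_match_characters (string : String) (words : List String) : String :=
  let string_hashmap := create_hashing string
  let acc := words.foldl
    (fun (acc : List String × Int) word =>
      let word_hashmap := create_hashing word
      let word_in_string_hashmap := checkWord word_hashmap.keys word_hashmap string_hashmap
      if word_in_string_hashmap then (acc.1 ++ [word], acc.2 + PySem.Str.len word) else acc)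
    ([], 0)
  formatOut string acc.1 acc.2

-- ===== PORT B =====
-- the body of B's inner loop: 'if i < len(need) and need[i] == c: i += 1'
-- (need[i]? = some c is exactly 'i in range and need[i] == c')
def matchStep (need : List Char) (i : Nat) (c : Char) : Nat :=
  if need[i]? = some c then i + 1 else i

def find_match_characters_alt (string : String) (words : List String) : String :=
  let pool := PySem.List.sorted string.toList (fun c => c) false
  let acc := words.foldl
    (fun (acc : List String × Int) word =>
      let need := PySem.List.sorted word.toList (fun c => c) false
      let i := pool.foldl (matchStep need) 0
      if i = need.length then (acc.1 ++ [word], acc.2 + PySem.Str.len word) else acc)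
    ([], 0)
  formatOut string acc.1 acc.2

-- ===== PRECONDITION & SPEC =====
def Spec_find_match_characters (string : String) (words : List String) (out : String) : Prop := out = find_match_characters_alt string words
instance (string : String) (words : List String) (out : String) : Decidable (Spec_find_match_characters string words out) := by unfold Spec_find_match_characters; infer_instance

-- ===== CLAIM (what is proved, stated in full; the proofs are below) =====
def Claim_equal_find_match_characters : Prop := ∀ (string : String) (words : List String), Dom_find_match_characters string words → Spec_find_match_characters string words (find_match_characters string words)

-- ===== LEMMAS AND PROOFS =====

theorem create_hashing_eq_counter (s : String) :
    create_hashing s = PySem.Dict.counter s.toList := by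
  unfold create_hashing
  rw [PySem.List.foldl_congr_mem
    (g := fun (h : PySem.Dict Char Int) c => h.insert c (h.getD c 0 + 1))]
  · exact PySem.Dict.foldl_insert_getD_add_one_eq_counter s.toList
  · intro h c _
    by_cases hc : h.contains c = true
    · simp [hc]
    · simp only [Bool.not_eq_true] at hc
      simp [hc, PySem.Dict.getD_of_not_contains]

theorem checkWord_eq_all (keys : List Char) (wh sh : PySem.Dict Char Int) :
    checkWord keys wh sh
      = keys.all (fun c => sh.contains c && !(sh.getD c 0 < wh.getD c 0)) := by
  induction keys with
  | nil => rfl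
  | cons c rest ih =>
    simp only [checkWord, List.all_cons]
    by_cases h1 : sh.contains c = true
    · by_cases h2 : sh.getD c 0 < wh.getD c 0 <;> simp [h1, h2, ih]
    · simp only [Bool.not_eq_true] at h1; simp [h1]

-- A accepts a word iff its character multiset fits inside the string's
theorem acceptA_iff (s w : String) :
    checkWord (create_hashing w).keys (create_hashing w) (create_hashing s) = true
      ↔ ∀ c : Char, w.toList.count c ≤ s.toList.count c := by
  rw [create_hashing_eq_counter, create_hashing_eq_counter, checkWord_eq_all,
    PySem.Dict.keys_counter]
  simp only [List.all_eq_true]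
  constructor
  · intro h c
    by_cases hc : c ∈ w.toList
    · have := h c (by rwa [PySem.Set.mem_ofList])
      simp only [PySem.Dict.contains_counter, PySem.Dict.getD_counter, Bool.and_eq_true,
        Bool.not_eq_true', decide_eq_false_iff_not, not_lt] at this
      exact_mod_cast this.2
    · simp [List.count_eq_zero_of_not_mem hc]
  · intro h c hc
    have hle : w.toList.count c ≤ s.toList.count c := h c
    have hcs : c ∈ s.toList := by
      have hw : 0 < w.toList.count c :=
        List.count_pos_iff.mpr (by rwa [PySem.Set.mem_ofList] at hc)
      exact List.count_pos_iff.mp (lt_of_lt_of_le hw hle)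
    simp only [PySem.Dict.contains_counter, PySem.Dict.getD_counter, Bool.and_eq_true,
      Bool.not_eq_true', decide_eq_false_iff_not, not_lt]
    exact ⟨by simpa using hcs, by exact_mod_cast hle⟩

-- recursive reading of B's greedy loop: what remains of `need` after scanning `pool`
def greedyRem (pool need : List Char) : List Char :=
  match pool with
  | [] => need
  | c :: p => greedyRem p (if need.head? = some c then need.tail else need)

theorem greedyRem_nil (p : List Char) : greedyRem p [] = [] := by
  induction p with
  | nil => rfl
  | cons c q ih => simp [greedyRem, ih]

-- the index fold of B computes exactly greedyRem
theorem foldl_matchStep (pool need : List Char) :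
    ∀ i, i ≤ need.length →
      need.drop (pool.foldl (matchStep need) i) = greedyRem pool (need.drop i)
        ∧ pool.foldl (matchStep need) i ≤ need.length := by
  induction pool with
  | nil => intro i hi; exact ⟨rfl, hi⟩
  | cons c p ih =>
    intro i hi
    simp only [List.foldl_cons, greedyRem, matchStep]
    rw [List.head?_drop, List.tail_drop]
    by_cases h : need[i]? = some c
    · have hlt : i < need.length := by
        by_contra hge
        rw [List.getElem?_eq_none (by omega)] at h; simp at h
      simpa [h] using ih (i + 1) (by omega)
    · simpa [h] using ih i hi

theorem acceptB_iff_greedy (pool need : List Char) :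
    pool.foldl (matchStep need) 0 = need.length ↔ greedyRem pool need = [] := by
  obtain ⟨hdrop, hle⟩ := foldl_matchStep pool need 0 (Nat.zero_le _)
  simp only [List.drop_zero] at hdrop
  rw [← hdrop, List.drop_eq_nil_iff]
  omega

-- on sorted lists, the greedy match succeeds iff the multiset fits
theorem greedy_empty_iff (pool : List Char) :
    ∀ need : List Char, pool.Pairwise (· ≤ ·) → need.Pairwise (· ≤ ·) →
      (greedyRem pool need = [] ↔ ∀ c : Char, need.count c ≤ pool.count c) := by
  induction pool with
  | nil =>
    intro need _ _
    simp only [greedyRem]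
    constructor
    · intro h c; simp [h]
    · intro h
      cases need with
      | nil => rfl
      | cons d t =>
        have := h d
        simp [List.count_cons_self] at this
  | cons c p ih =>
    intro need hp hn
    have hpc : ∀ a ∈ p, c ≤ a := (List.pairwise_cons.mp hp).1
    have hpt : p.Pairwise (· ≤ ·) := (List.pairwise_cons.mp hp).2
    cases need with
    | nil => simp [greedyRem, greedyRem_nil]
    | cons d t =>
      have hnd : ∀ a ∈ t, d ≤ a := (List.pairwise_cons.mp hn).1
      have hnt : t.Pairwise (· ≤ ·) := (List.pairwise_cons.mp hn).2
      by_cases hdc : d = c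
      · subst hdc
        have hg : greedyRem (d :: p) (d :: t) = greedyRem p t := by simp [greedyRem]
        rw [hg, ih t hpt hnt]
        constructor <;>
        · intro h e
          have := h e
          simp only [List.count_cons] at this ⊢
          omega
      · have hg : greedyRem (c :: p) (d :: t) = greedyRem p (d :: t) := by
          simp [greedyRem, hdc]
        rw [hg, ih (d :: t) hpt hn]
        constructor
        · intro h e
          exact le_trans (h e) List.count_le_count_cons
        · intro h e
          rcases lt_trichotomy c d with hcd | hcd | hcd
          · -- c < d : only the count of c could differ, and c does not occur in d :: t
            by_cases hec : e = c
            · subst hec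
              have hnotin : e ∉ d :: t := by
                intro hmem
                rcases List.mem_cons.mp hmem with h1 | h1
                · exact hdc (h1 ▸ rfl)
                · exact absurd (hnd e h1) (not_le.mpr hcd)
              simp [List.count_eq_zero_of_not_mem hnotin]
            · have := h e
              have hce : ¬ (c = e) := fun hh => hec hh.symm
              simp only [List.count_cons, beq_iff_eq, if_neg hce] at this
              simp only [List.count_cons, beq_iff_eq] at this ⊢
              omega
          · exact absurd hcd.symm hdc
          · -- d < c : impossible, then d could not occur in c :: p at all
            exfalso
            have hd := h d
            have hdp : d ∉ p := fun hmem => absurd (hpc d hmem) (not_le.mpr hcd)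
            have hnotin : d ∉ c :: p := by
              intro hmem
              rcases List.mem_cons.mp hmem with h1 | h1
              · exact hdc h1
              · exact hdp h1
            rw [List.count_eq_zero_of_not_mem hnotin] at hd
            simp [List.count_cons_self] at hd

-- B's acceptance test equals A's
theorem accept_eq (s w : String) :
    checkWord (create_hashing w).keys (create_hashing w) (create_hashing s)
      = decide ((PySem.List.sorted s.toList (fun c => c) false).foldl
          (matchStep (PySem.List.sorted w.toList (fun c => c) false)) 0
          = (PySem.List.sorted w.toList (fun c => c) false).length) := by
  rw [Bool.eq_iff_iff, decide_eq_true_iff, acceptA_iff, acceptB_iff_greedy,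
    greedy_empty_iff _ _
      (by simpa using PySem.List.sorted_pairwise s.toList (fun c => c))
      (by simpa using PySem.List.sorted_pairwise w.toList (fun c => c))]
  constructor
  · intro h c
    rw [(PySem.List.sorted_perm w.toList (fun c => c) false).count_eq,
      (PySem.List.sorted_perm s.toList (fun c => c) false).count_eq]
    exact h c
  · intro h c
    have := h c
    rwa [(PySem.List.sorted_perm w.toList (fun c => c) false).count_eq,
      (PySem.List.sorted_perm s.toList (fun c => c) false).count_eq] at this

-- ===== VERDICT (by name: the statement is the Claim_ definition above) =====
theorem find_match_characters_spec : Claim_equal_find_match_characters := by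
  intro string words _
  unfold Spec_find_match_characters
  simp only [find_match_characters, find_match_characters_alt]
  congr 2 <;>
  · congr 1
    funext acc word
    rw [accept_eq]
    simp
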